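-- pv_equiv track=rewrite | github.com/jkozienski/WdC | Lab_3/main.py | read_and_prepare
-- ===== SOURCE A (Python) =====
-- def read_and_prepare(text, block_size=10):
--     """
--     Wczytuje tekst, czyści do liter a-z, dzieli na bloki po block_size znaków.
--     Ostatni blok jest uzupełniany literą 'a' (wartość 0) jeśli jest krótszy.
--     Zwraca: listę bloków (str), lista długości każdego bloku (dla poprawnego dekodowania).
--     """
--     clean = ''.join(c for c in text.lower() if 'a' <= c <= 'z')
--     if not clean:
--         raise ValueError("Tekst nie zawiera liter a-z!")
--
--     blocks = []
--     lengths = []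
--     for i in range(0, len(clean), block_size):
--         block = clean[i:i + block_size]
--         lengths.append(len(block))
--         # Uzupełnienie ostatniego bloku
--         block = block.ljust(block_size, 'a')
--         blocks.append(block)
--     return blocks, lengths
-- ===== SOURCE B (Python) =====
-- def read_and_prepare(text, block_size=10):
--     """
--     Same cleaning (keep a-z of the lowercased text, raise if empty), but pad the
--     whole cleaned string ONCE to the next multiple of block_size and slice it
--     into equal blocks; the lengths list is built arithmetically, not per block.
--     """
--     clean = ''.join(c for c in text.lower() if 'a' <= c <= 'z')
--     if not clean:
--         raise ValueError("Tekst nie zawiera liter a-z!")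
--
--     rem = len(clean) % block_size
--     padded = clean + 'a' * ((block_size - rem) % block_size) if rem else clean
--     blocks = [padded[i:i + block_size] for i in range(0, len(clean), block_size)]
--     lengths = [block_size] * (len(blocks) - 1) + [rem or block_size] if blocks else []
--     return blocks, lengths
-- ===== Notes on version B (the rewrite author's own statement) =====
-- stated objective: alternative
-- what changed: A computes each block's length and ljust-padding inside the loop; B pads the cleaned string once to the next multiple of block_size, slices it into already-full blocks, and builds the lengths list arithmetically (block_size for every block but the last, then the remainder).
import Mathlib
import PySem

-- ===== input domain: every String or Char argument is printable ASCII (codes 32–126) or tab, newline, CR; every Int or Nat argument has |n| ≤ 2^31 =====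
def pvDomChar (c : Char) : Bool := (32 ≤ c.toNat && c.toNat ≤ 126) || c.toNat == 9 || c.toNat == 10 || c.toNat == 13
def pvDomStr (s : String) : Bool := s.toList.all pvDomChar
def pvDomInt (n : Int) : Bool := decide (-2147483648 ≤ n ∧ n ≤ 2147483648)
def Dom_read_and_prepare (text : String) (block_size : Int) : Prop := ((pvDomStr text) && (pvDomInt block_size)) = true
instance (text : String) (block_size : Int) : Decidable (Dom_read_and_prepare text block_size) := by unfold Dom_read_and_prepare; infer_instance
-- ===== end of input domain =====

-- B pads the cleaned text once to a multiple of block_size and builds the lengths list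
-- arithmetically, instead of A's per-iteration ljust/len accumulation; same return value on Pre_.

-- ===== PORT A =====
-- clean = ''.join(c for c in text.lower() if 'a' <= c <= 'z')   (identical line in A and B)
def pvClean (text : String) : List Char :=
  (PySem.Str.lower text).toList.filter (fun c => decide ('a' ≤ c ∧ c ≤ 'z'))

-- A's for-loop: per iteration, append len(block) to lengths and block.ljust(block_size,'a')
-- to blocks (ljust ported exactly: pad with max(block_size - len, 0) letters 'a')
def pvLoopA (clean : List Char) (bs : Int) : List String × List Int :=
  (PySem.List.pyRange 0 (clean.length : Int) bs).foldl
    (fun acc i =>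
      let block := PySem.List.slice clean (some i) (some (i + bs))
      (acc.1 ++ [String.ofList (block ++ List.replicate ((bs - (block.length : Int)).toNat) 'a')],
       acc.2 ++ [(block.length : Int)]))
    ([], [])

def read_and_prepare (text : String) (block_size : Int) : List String × List Int :=
  let clean := pvClean text
  if clean = [] then ([], [])   -- Python raises ValueError here; excluded by Pre_
  else pvLoopA clean block_size

-- ===== PORT B =====
def pvBodyB (clean : List Char) (bs : Int) : List String × List Int :=
  let n : Int := (clean.length : Int)
  let rem := PySem.Int.mod n bs
  let padded := if rem ≠ 0 then clean ++ List.replicate ((PySem.Int.mod (bs - rem) bs).toNat) 'a' else clean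
  let blocks := (PySem.List.pyRange 0 n bs).map
    (fun i => String.ofList (PySem.List.slice padded (some i) (some (i + bs))))
  let lengths : List Int :=
    if blocks ≠ [] then List.replicate (blocks.length - 1) bs ++ [if rem ≠ 0 then rem else bs] else []
  (blocks, lengths)

def read_and_prepare_alt (text : String) (block_size : Int) : List String × List Int :=
  let clean := pvClean text
  if clean = [] then ([], [])   -- Python raises ValueError here; excluded by Pre_
  else pvBodyB clean block_size

-- ===== PRECONDITION & SPEC =====
-- Pre_ excludes exactly the inputs where the Python A raises: no a-z letter in the text
-- (ValueError) or block_size = 0 (range() step 0, ValueError); B also raises on both.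
def Pre_read_and_prepare (text : String) (block_size : Int) : Prop :=
  pvClean text ≠ [] ∧ block_size ≠ 0
instance (text : String) (block_size : Int) : Decidable (Pre_read_and_prepare text block_size) := by
  unfold Pre_read_and_prepare; infer_instance

def pvWitness_read_and_prepare : String × Int := ("Ala ma kota!", 5)

def Spec_read_and_prepare (text : String) (block_size : Int) (out : List String × List Int) : Prop := out = read_and_prepare_alt text block_size
instance (text : String) (block_size : Int) (out : List String × List Int) : Decidable (Spec_read_and_prepare text block_size out) := by unfold Spec_read_and_prepare; infer_instance

-- ===== CLAIM (what is proved, stated in full; the proofs are below) =====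
def Claim_equal_read_and_prepare : Prop := ∀ (text : String) (block_size : Int), Dom_read_and_prepare text block_size → Pre_read_and_prepare text block_size → Spec_read_and_prepare text block_size (read_and_prepare text block_size)

-- ===== LEMMAS AND PROOFS =====

-- ceiling-division step: (m + B)/B = m/B + 1
lemma pvEdivAddSelf (m B : Int) (h : B ≠ 0) : (m + B) / B = m / B + 1 := by
  have := Int.add_mul_ediv_right m 1 h
  simpa using this

-- the element count of range(0, n, B) written with n-1, so it peels off by one
lemma pvCountEq (n B : Nat) (h0 : 0 < n) (hB : 0 < B) :
    (((n : Int) - 0 + B - 1) / B).toNat = (((n - 1 : Nat) : Int) / B).toNat + 1 := by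
  have h1 : ((n : Int) - 0 + B - 1) = ((n - 1 : Nat) : Int) + B := by push_cast [h0]; omega
  rw [h1, pvEdivAddSelf _ _ (by omega)]
  have h2 : (0:Int) ≤ ((n - 1 : Nat) : Int) / B := Int.ediv_nonneg (by positivity) (by positivity)
  omega

lemma pyRange_nonpos (n : Nat) (bs : Int) (h : bs ≤ 0) :
    PySem.List.pyRange 0 (n : Int) bs = [] := by
  rcases eq_or_lt_of_le h with h0 | h0
  · simp [PySem.List.pyRange, h0.symm]
  · simp only [PySem.List.pyRange]
    rw [if_neg (by omega), if_neg (by omega), if_neg (by omega)]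
    simp

-- range(0, n, B) = [0] when 0 < n ≤ B
lemma pyRange_pos_singleton (n B : Nat) (h0 : 0 < n) (h1 : n ≤ B) :
    PySem.List.pyRange 0 (n : Int) (B : Int) = [0] := by
  have hB : 0 < B := h1.trans_lt' h0
  rw [PySem.List.pyRange_of_pos _ _ (by exact_mod_cast hB : (0:Int) < B)]
  rw [if_pos (by exact_mod_cast h0), pvCountEq n B h0 hB]
  have hz : ((n - 1 : Nat) : Int) / B = 0 :=
    Int.ediv_eq_zero_of_lt (by positivity) (by exact_mod_cast (show n - 1 < B by omega))
  rw [hz]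
  simp

-- range(0, n, B) = [0] + [i + B for i in range(0, n - B, B)] when 0 < B < n
lemma pyRange_pos_cons (n B : Nat) (hB : 0 < B) (h : B < n) :
    PySem.List.pyRange 0 (n : Int) (B : Int) =
      0 :: (PySem.List.pyRange 0 ((n - B : Nat) : Int) (B : Int)).map (· + (B : Int)) := by
  have hBi : (0:Int) < B := by exact_mod_cast hB
  rw [PySem.List.pyRange_of_pos _ _ hBi, PySem.List.pyRange_of_pos _ _ hBi]
  rw [if_pos (by exact_mod_cast (show 0 < n by omega)), if_pos (by exact_mod_cast (show 0 < n - B by omega))]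
  rw [pvCountEq n B (by omega) hB, pvCountEq (n - B) B (by omega) hB]
  have he : ((n - B - 1 : Nat) : Int) + B = ((n - 1 : Nat) : Int) := by
    push_cast [show B ≤ n - 1 by omega, show 1 ≤ n - B by omega]; omega
  have h3 : (((n - 1 : Nat) : Int) / B).toNat = (((n - B - 1 : Nat) : Int) / B).toNat + 1 := by
    rw [← he, pvEdivAddSelf _ _ (by omega)]
    have : (0:Int) ≤ ((n - B - 1 : Nat) : Int) / B := Int.ediv_nonneg (by positivity) (by positivity)
    omega
  rw [h3]
  rw [List.range_succ_eq_map]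
  simp [List.map_map, Function.comp]
  intro a _
  ring

lemma pyRange_pos_ne_nil (n B : Nat) (hB : 0 < B) (h0 : 0 < n) :
    PySem.List.pyRange 0 (n : Int) (B : Int) ≠ [] := by
  by_cases h : n ≤ B
  · rw [pyRange_pos_singleton n B h0 h]; simp
  · rw [pyRange_pos_cons n B hB (by omega)]; simp

-- the per-index block/length values A's loop appends
def pvFA (clean : List Char) (bs i : Int) : String :=
  String.ofList (PySem.List.slice clean (some i) (some (i + bs)) ++
    List.replicate ((bs - ((PySem.List.slice clean (some i) (some (i + bs))).length : Int)).toNat) 'a')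
def pvGA (clean : List Char) (bs i : Int) : Int :=
  ((PySem.List.slice clean (some i) (some (i + bs))).length : Int)

lemma pvLoopA_eq_map (clean : List Char) (bs : Int) :
    pvLoopA clean bs =
      ((PySem.List.pyRange 0 (clean.length : Int) bs).map (pvFA clean bs),
       (PySem.List.pyRange 0 (clean.length : Int) bs).map (pvGA clean bs)) := by
  unfold pvLoopA
  have hfun : (fun (acc : List String × List Int) (i : Int) =>
      let block := PySem.List.slice clean (some i) (some (i + bs))
      (acc.1 ++ [String.ofList (block ++ List.replicate ((bs - (block.length : Int)).toNat) 'a')],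
       acc.2 ++ [(block.length : Int)]))
      = (fun (acc : List String × List Int) (i : Int) =>
         (acc.1 ++ [pvFA clean bs i], acc.2 ++ [pvGA clean bs i])) := by
    funext acc i
    simp [pvFA, pvGA]
  rw [hfun]
  rw [PySem.List.foldl_prod_mk (f := fun acc i => acc ++ [pvFA clean bs i])
      (g := fun acc i => acc ++ [pvGA clean bs i])]
  rw [PySem.List.foldl_append_singleton_eq_map, PySem.List.foldl_append_singleton_eq_map]
  simp

lemma pvNeg (bs : Int) (hbs : bs < 0) (clean : List Char) :
    pvLoopA clean bs = pvBodyB clean bs := by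
  rw [pvLoopA_eq_map]
  unfold pvBodyB
  simp [pyRange_nonpos _ _ (le_of_lt hbs)]

-- l[i+B : i+2B] = l[B:][i : i+B] for 0 ≤ i
lemma pvSliceShift (l : List Char) (B : Nat) (i : Int) (hi : 0 ≤ i) :
    PySem.List.slice l (some (i + B)) (some (i + B + B)) =
      PySem.List.slice (l.drop B) (some i) (some (i + B)) := by
  obtain ⟨j, rfl⟩ : ∃ j : Nat, i = (j : Int) := ⟨i.toNat, by omega⟩
  have h1 := PySem.List.slice_natCast_add l (j + B) B
  have h2 := PySem.List.slice_natCast_add (l.drop B) j B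
  push_cast at h1
  rw [h1, h2, List.drop_drop]
  ring_nf

lemma pvSliceZero (l : List Char) (B : Nat) :
    PySem.List.slice l (some 0) (some (0 + (B : Int))) = l.take B := by
  simp  -- slice_zero_start + slice_to_natCast from the pysem simp set

lemma pvFA_zero (clean : List Char) (B : Nat) :
    pvFA clean (B : Int) 0 =
      String.ofList (clean.take B ++ List.replicate (B - clean.length) 'a') := by
  unfold pvFA
  rw [pvSliceZero]
  have hl : (((B:Int)) - (((clean.take B).length : Nat) : Int)).toNat = B - clean.length := by
    rw [List.length_take]; omega
  rw [hl]

lemma pvGA_zero (clean : List Char) (B : Nat) :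
    pvGA clean (B : Int) 0 = ((min B clean.length : Nat) : Int) := by
  unfold pvGA
  rw [pvSliceZero, List.length_take]

-- one-block case of B: the whole (padded) clean text is the single block
lemma pvBodyB_base (B : Nat) (clean : List Char) (h0 : clean ≠ []) (h1 : clean.length ≤ B) :
    pvBodyB clean (B : Int) =
      ([String.ofList (clean ++ List.replicate (B - clean.length) 'a')],
       [((clean.length : Nat) : Int)]) := by
  have hn : 0 < clean.length := List.length_pos_of_ne_nil h0
  dsimp only [pvBodyB]
  rw [PySem.Int.mod_natCast, pyRange_pos_singleton clean.length B hn h1]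
  rcases eq_or_lt_of_le h1 with he | hlt
  · -- clean.length = B : remainder 0, no padding
    rw [he, Nat.mod_self]
    norm_num
    rw [List.take_of_length_le (by omega)]
  · -- clean.length < B : pad with B - clean.length letters 'a'
    have hr : clean.length % B = clean.length := Nat.mod_eq_of_lt hlt
    rw [hr]
    have hrem : (((clean.length : Nat) : Int)) ≠ 0 := by exact_mod_cast Nat.pos_iff_ne_zero.mp hn
    rw [if_pos hrem]
    have hsub : (B : Int) - ((clean.length : Nat) : Int) = (((B - clean.length : Nat)) : Int) := by omega
    rw [hsub, PySem.Int.mod_natCast, Nat.mod_eq_of_lt (by omega), Int.toNat_natCast]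
    have hlen : (clean ++ List.replicate (B - clean.length) 'a').length = B := by
      simp; omega
    simp only [List.map_cons, List.map_nil, pvSliceZero]
    rw [List.take_of_length_le (le_of_eq hlen)]
    simp
    exact fun hc => absurd hc h0

-- peel one full block off B's result when B < len(clean)
lemma pvBodyB_cons (B : Nat) (hB : 0 < B) (clean : List Char) (h : B < clean.length) :
    pvBodyB clean (B : Int) =
      (String.ofList (clean.take B) :: (pvBodyB (clean.drop B) (B : Int)).1,
       (B : Int) :: (pvBodyB (clean.drop B) (B : Int)).2) := by
  dsimp only [pvBodyB]
  rw [List.length_drop, PySem.Int.mod_natCast, PySem.Int.mod_natCast,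
      Nat.mod_eq_sub_mod (le_of_lt h)]
  set r : Nat := (clean.length - B) % B with hrdef
  set p : Nat := (PySem.Int.mod ((B : Int) - (r : Int)) (B : Int)).toNat with hpdef
  have htakelen : (clean.take B).length = B := by rw [List.length_take]; omega
  have hsplit : (if ((r : Nat) : Int) ≠ 0 then clean ++ List.replicate p 'a' else clean)
      = clean.take B ++ (if ((r : Nat) : Int) ≠ 0 then clean.drop B ++ List.replicate p 'a' else clean.drop B) := by
    split_ifs
    · rw [← List.append_assoc, List.take_append_drop]
    · rw [List.take_append_drop]
  rw [hsplit]
  set padded' : List Char := (if ((r : Nat) : Int) ≠ 0 then clean.drop B ++ List.replicate p 'a' else clean.drop B) with hp'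
  rw [pyRange_pos_cons clean.length B hB h]
  simp only [List.map_cons, List.map_map]
  have hhead : PySem.List.slice (clean.take B ++ padded') (some 0) (some (0 + (B : Int))) = clean.take B := by
    rw [pvSliceZero, List.take_left' htakelen]
  have htail : ∀ i ∈ PySem.List.pyRange 0 (((clean.length - B : Nat)) : Int) (B : Int),
      ((fun i => String.ofList (PySem.List.slice (clean.take B ++ padded') (some i) (some (i + (B : Int))))) ∘ (· + (B : Int))) i
        = String.ofList (PySem.List.slice padded' (some i) (some (i + (B : Int)))) := by
    intro i hi
    have hi0 : 0 ≤ i := by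
      have := (PySem.List.mem_pyRange_iff_of_pos (by exact_mod_cast hB) i).mp hi
      omega
    simp only [Function.comp_apply]
    rw [pvSliceShift _ B i hi0, List.drop_left' htakelen]
  rw [List.map_congr_left htail]
  have hne' : (PySem.List.pyRange 0 (((clean.length - B : Nat)) : Int) (B : Int)).map
      (fun i => String.ofList (PySem.List.slice padded' (some i) (some (i + (B : Int))))) ≠ [] := by
    intro hc
    exact pyRange_pos_ne_nil _ B hB (by omega) (List.map_eq_nil_iff.mp hc)
  rw [hhead]
  simp only [Prod.mk.injEq]
  constructor
  · trivial
  · rw [if_pos (by simp), if_pos hne']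
    have hL : 0 < ((PySem.List.pyRange 0 (((clean.length - B : Nat)) : Int) (B : Int)).map
        (fun i => String.ofList (PySem.List.slice padded' (some i) (some (i + (B : Int)))))).length :=
      List.length_pos_iff.mpr hne'
    simp only [List.length_cons]
    rw [show ((PySem.List.pyRange 0 (((clean.length - B : Nat)) : Int) (B : Int)).map
        (fun i => String.ofList (PySem.List.slice padded' (some i) (some (i + (B : Int)))))).length + 1 - 1
        = (((PySem.List.pyRange 0 (((clean.length - B : Nat)) : Int) (B : Int)).map
        (fun i => String.ofList (PySem.List.slice padded' (some i) (some (i + (B : Int)))))).length - 1) + 1 from by omega]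
    rw [List.replicate_succ]
    simp

-- one-block case of A
lemma pvLoopA_base (B : Nat) (clean : List Char) (h0 : clean ≠ []) (h1 : clean.length ≤ B) :
    pvLoopA clean (B : Int) =
      ([String.ofList (clean ++ List.replicate (B - clean.length) 'a')],
       [((clean.length : Nat) : Int)]) := by
  rw [pvLoopA_eq_map, pyRange_pos_singleton _ _ (List.length_pos_of_ne_nil h0) h1]
  simp only [List.map_cons, List.map_nil]
  rw [pvFA_zero, pvGA_zero, List.take_of_length_le h1, min_eq_right h1]

-- peel one full block off A's loop when B < len(clean)
lemma pvLoopA_cons (B : Nat) (hB : 0 < B) (clean : List Char) (h : B < clean.length) :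
    pvLoopA clean (B : Int) =
      (String.ofList (clean.take B) :: (pvLoopA (clean.drop B) (B : Int)).1,
       (B : Int) :: (pvLoopA (clean.drop B) (B : Int)).2) := by
  rw [pvLoopA_eq_map, pvLoopA_eq_map, pyRange_pos_cons clean.length B hB h]
  simp only [List.map_cons, List.map_map, List.length_drop]
  have hF : ∀ i ∈ PySem.List.pyRange 0 (((clean.length - B : Nat)) : Int) (B : Int),
      (pvFA clean (B : Int) ∘ (· + (B : Int))) i = pvFA (clean.drop B) (B : Int) i := by
    intro i hi
    have hi0 : 0 ≤ i := by
      have := (PySem.List.mem_pyRange_iff_of_pos (by exact_mod_cast hB) i).mp hi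
      omega
    simp only [Function.comp_apply, pvFA]
    rw [pvSliceShift _ B i hi0]
  have hG : ∀ i ∈ PySem.List.pyRange 0 (((clean.length - B : Nat)) : Int) (B : Int),
      (pvGA clean (B : Int) ∘ (· + (B : Int))) i = pvGA (clean.drop B) (B : Int) i := by
    intro i hi
    have hi0 : 0 ≤ i := by
      have := (PySem.List.mem_pyRange_iff_of_pos (by exact_mod_cast hB) i).mp hi
      omega
    simp only [Function.comp_apply, pvGA]
    rw [pvSliceShift _ B i hi0]
  rw [List.map_congr_left hF, List.map_congr_left hG, pvFA_zero, pvGA_zero]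
  rw [min_eq_left (le_of_lt h), show B - clean.length = 0 from by omega]
  simp

-- the two loop bodies agree on every nonempty cleaned text, positive block size
lemma pvMain (B : Nat) (hB : 0 < B) (clean : List Char) (hne : clean ≠ []) :
    pvLoopA clean (B : Int) = pvBodyB clean (B : Int) := by
  by_cases hle : clean.length ≤ B
  · rw [pvLoopA_base B clean hne hle, pvBodyB_base B clean hne hle]
  · have hlt : B < clean.length := by omega
    have hd : clean.drop B ≠ [] := by
      rw [← List.length_pos_iff, List.length_drop]; omega
    rw [pvLoopA_cons B hB clean hlt, pvBodyB_cons B hB clean hlt,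
        pvMain B hB (clean.drop B) hd]
termination_by clean.length
decreasing_by simp [List.length_drop]; omega

-- ===== VERDICT (by name: the statement is the Claim_ definition above) =====
theorem read_and_prepare_spec : Claim_equal_read_and_prepare := by
  intro text bs _ hpre
  obtain ⟨hne, hbs⟩ := hpre
  unfold Spec_read_and_prepare read_and_prepare read_and_prepare_alt
  simp only [if_neg hne]
  rcases lt_trichotomy bs 0 with h | h | h
  · exact pvNeg bs h (pvClean text)
  · exact absurd h hbs
  · have hcast : bs = ((bs.toNat : Nat) : Int) := by omega
    rw [hcast]
    exact pvMain bs.toNat (by omega) (pvClean text) hne
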